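-- pv_equiv track=rewrite | github.com/Fernando3161/sql_lca | sankey/sankey.py | shorten_labels
-- ===== SOURCE A (Python) =====
-- from collections import defaultdict
--
-- SHORTEN_LABELS = True  # Option to shorten labels
--
-- def shorten_labels(labels, max_length=20):
--     """
--     Shortens labels to a specified maximum length and ensures uniqueness.
--
--     Args:
--         labels (list): List of labels to shorten.
--         max_length (int): Maximum length for each label.
--
--     Returns:
--         list: List of shortened labels.
--     """
--     if not SHORTEN_LABELS:
--         max_length = 500  # Avoid shortening if the option is disabled
--
--     seen = defaultdict(int)  # Dictionary to count occurrences
--     shortened = []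
--
--     for label in labels:
--         # Truncate the label
--         base_label = label[:max_length]
--         seen[base_label] += 1
--
--         # Create a unique label
--         unique_label = f"{base_label}_{seen[base_label] - 1}" if seen[base_label] > 1 else base_label
--         shortened.append(unique_label)
--
--     return shortened
-- ===== SOURCE B (Python) =====
-- SHORTEN_LABELS = True  # Option to shorten labels
--
-- def shorten_labels(labels, max_length=20):
--     """Group-then-scatter re-implementation: bucket output positions by
--     truncated base label, then write each bucket's names into place."""
--     if not SHORTEN_LABELS:
--         max_length = 500  # Avoid shortening if the option is disabled
--
--     bases = [label[:max_length] for label in labels]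
--
--     groups = {}
--     for i, base in enumerate(bases):
--         groups.setdefault(base, []).append(i)
--
--     result = [None] * len(bases)
--     for base, idxs in groups.items():
--         result[idxs[0]] = base
--         for j, i in enumerate(idxs[1:], 1):
--             result[i] = f"{base}_{j}"
--     return result
-- ===== Notes on version B (the rewrite author's own statement) =====
-- stated objective: alternative
-- what changed: A's single streaming loop that maintains a running defaultdict counter and renames each label as it goes is replaced by a group-then-scatter decomposition: one pass buckets output positions by truncated base label, then each bucket's first position gets the plain base and the j-th subsequent position gets base_j, scattered into a preallocated result list.
import Mathlib
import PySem

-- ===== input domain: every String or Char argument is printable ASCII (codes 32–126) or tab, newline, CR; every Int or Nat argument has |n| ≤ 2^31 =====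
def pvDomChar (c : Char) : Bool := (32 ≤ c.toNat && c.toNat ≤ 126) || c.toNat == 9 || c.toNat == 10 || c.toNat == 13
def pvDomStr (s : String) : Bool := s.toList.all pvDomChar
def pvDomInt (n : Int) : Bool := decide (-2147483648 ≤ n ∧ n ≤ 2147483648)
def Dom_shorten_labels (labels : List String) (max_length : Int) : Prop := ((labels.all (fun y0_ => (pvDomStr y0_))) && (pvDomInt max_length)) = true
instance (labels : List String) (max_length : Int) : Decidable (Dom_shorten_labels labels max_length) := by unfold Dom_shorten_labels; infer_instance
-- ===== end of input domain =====

-- B replaces A's single streaming count-and-rename loop by a group-then-scatter pass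
-- (bucket output positions by truncated base, then write each bucket's names into place);
-- objective: alternative decomposition, same exact output.

-- module constant SHORTEN_LABELS = True
def pvShortenLabelsFlag : Bool := true

-- f"{base}_{j}" ported as code-point concatenation (exact; both Pythons build this very string)
def pvFmt (base : String) (j : Int) : String :=
  String.ofList (base.toList ++ '_' :: PySem.Int.toChars j)

-- ===== PORT A =====
def shorten_labels (labels : List String) (max_length : Int) : List String :=
  let max_length := if !pvShortenLabelsFlag then 500 else max_length
  (labels.foldl
    (fun (st : PySem.Dict String Int × List String) label =>
      let base := PySem.Str.slice label none (some max_length)   -- label[:max_length]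
      let seen := st.1.modify base 0 (· + 1)                     -- seen[base] += 1 (defaultdict(int))
      let cnt  := seen.getD base 0
      let unique := if cnt > 1 then pvFmt base (cnt - 1) else base
      (seen, st.2 ++ [unique]))
    (PySem.Dict.empty, [])).2

-- ===== PORT B =====
-- result[idxs[0]] = base; then for j, i in enumerate(idxs[1:], 1): result[i] = f"{base}_{j}".
-- indices come from enumerate, hence are ≥ 0 and < len(result): .toNat is exact here.
def pvScatter (res : List String) (p : String × List Int) : List String :=
  match p.2 with
  | [] => res   -- unreachable: every group holds at least one index
  | i0 :: rest =>
      (PySem.List.enumerate rest 1).foldl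
        (fun r q => r.set q.2.toNat (pvFmt p.1 q.1))
        (res.set i0.toNat p.1)

def shorten_labels_alt (labels : List String) (max_length : Int) : List String :=
  let max_length := if !pvShortenLabelsFlag then 500 else max_length
  let bases := labels.map (fun label => PySem.Str.slice label none (some max_length))
  let groups : PySem.Dict String (List Int) :=
    (PySem.List.enumerate bases).foldl
      (fun d p => d.modify p.2 [] (fun l => l ++ [p.1]))         -- groups.setdefault(base, []).append(i)
      PySem.Dict.empty
  -- [None] * len(bases): placeholder "" (every slot is overwritten, each index is in exactly one group)
  let result := List.replicate bases.length ""
  groups.items.foldl pvScatter result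

-- ===== PRECONDITION & SPEC =====
def Spec_shorten_labels (labels : List String) (max_length : Int) (out : List String) : Prop := out = shorten_labels_alt labels max_length
instance (labels : List String) (max_length : Int) (out : List String) : Decidable (Spec_shorten_labels labels max_length out) := by unfold Spec_shorten_labels; infer_instance

-- ===== CLAIM (what is proved, stated in full; the proofs are below) =====
def Claim_equal_shorten_labels : Prop := ∀ (labels : List String) (max_length : Int), Dom_shorten_labels labels max_length → Spec_shorten_labels labels max_length (shorten_labels labels max_length)

-- ===== LEMMAS AND PROOFS =====

-- the name given to an output slot whose base b was already seen c times before it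
def pvName (b : String) (c : Nat) : String := if c = 0 then b else pvFmt b (c : Int)

-- A's loop, as a function of the truncated bases still to process and the bases already processed
def pvA (pre : List String) : List String → List String
  | [] => []
  | b :: t => pvName b (pre.count b) :: pvA (pre ++ [b]) t

-- positions (as Python ints) at which base k occurs in the list of truncated bases
def pvOcc (k : String) : List String → List Int
  | [] => []
  | b :: t => (if b = k then [(0 : Int)] else []) ++ (pvOcc k t).map (· + 1)

-- A's loop body, with the truncated base as the element
def pvStepA (st : PySem.Dict String Int × List String) (base : String) :
    PySem.Dict String Int × List String :=
  let seen := st.1.modify base 0 (· + 1)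
  let cnt  := seen.getD base 0
  let unique := if cnt > 1 then pvFmt base (cnt - 1) else base
  (seen, st.2 ++ [unique])

theorem pvA_length (pre bs : List String) : (pvA pre bs).length = bs.length := by
  induction bs generalizing pre with
  | nil => rfl
  | cons b t ih => simp [pvA, ih]

theorem pvA_getElem (bs : List String) : ∀ (pre : List String) (i : Nat) (h : i < bs.length),
    (pvA pre bs)[i]'(by rw [pvA_length]; exact h) =
      pvName bs[i] ((pre ++ bs.take i).count bs[i]) := by
  induction bs with
  | nil => intro pre i h; simp at h
  | cons b t ih =>
    intro pre i h
    cases i with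
    | zero => simp [pvA]
    | succ i =>
      simp only [pvA, List.getElem_cons_succ, List.take_succ_cons]
      rw [ih (pre ++ [b]) i (by simpa using h)]
      simp [List.append_assoc]

theorem A_step (pre acc : List String) (b : String) :
    pvStepA (PySem.Dict.counter pre, acc) b
    = (PySem.Dict.counter (pre ++ [b]), acc ++ [pvName b (pre.count b)]) := by
  unfold pvStepA
  have hseen : (PySem.Dict.counter pre).modify b 0 (· + 1) = PySem.Dict.counter (pre ++ [b]) :=
    (PySem.Dict.counter_append_singleton pre b).symm
  simp only [hseen]
  have hcnt : (PySem.Dict.counter (pre ++ [b])).getD b 0 = ((pre ++ [b]).count b : Int) :=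
    PySem.Dict.getD_counter _ _
  simp only [hcnt, List.count_append, List.count_singleton]
  congr 1
  by_cases h : pre.count b = 0
  · simp [pvName, h]
  · have : ((pre.count b : Int) + 1 > 1) := by omega
    simp [pvName, h, this]

theorem A_loop (bs : List String) : ∀ (pre acc : List String),
    (bs.foldl pvStepA (PySem.Dict.counter pre, acc)).2 = acc ++ pvA pre bs := by
  induction bs with
  | nil => intro pre acc; simp [pvA]
  | cons b t ih =>
    intro pre acc
    rw [List.foldl_cons, A_step pre acc b, ih (pre ++ [b]) (acc ++ [pvName b (pre.count b)])]
    simp [pvA]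

theorem A_eq_pvA (labels : List String) (m : Int) :
    shorten_labels labels m = pvA [] (labels.map (fun l => PySem.Str.slice l none (some m))) := by
  show (labels.foldl (fun st label => pvStepA st (PySem.Str.slice label none (some m)))
      (PySem.Dict.empty, [])).2 = _
  rw [← List.foldl_map (f := fun l => PySem.Str.slice l none (some m)) (g := pvStepA)]
  rw [show (PySem.Dict.empty : PySem.Dict String Int) = PySem.Dict.counter ([] : List String) from rfl]
  exact A_loop _ [] []

theorem pvOcc_nonneg (k : String) (bs : List String) : ∀ x ∈ pvOcc k bs, 0 ≤ x := by
  induction bs with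
  | nil => simp [pvOcc]
  | cons b t ih =>
    intro x hx
    simp only [pvOcc, List.mem_append, List.mem_map] at hx
    rcases hx with hx | ⟨y, hy, rfl⟩
    · split at hx <;> simp_all
    · have := ih y hy; omega

theorem pvOcc_lt (k : String) (bs : List String) : ∀ x ∈ pvOcc k bs, x < bs.length := by
  induction bs with
  | nil => simp [pvOcc]
  | cons b t ih =>
    intro x hx
    simp only [pvOcc, List.mem_append, List.mem_map] at hx
    rcases hx with hx | ⟨y, hy, rfl⟩
    · split at hx <;> simp_all
    · have := ih y hy; simp; omega

theorem pvOcc_nodup (k : String) (bs : List String) : (pvOcc k bs).Nodup := by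
  induction bs with
  | nil => simp [pvOcc]
  | cons b t ih =>
    simp only [pvOcc]
    apply List.Nodup.append
    · split <;> simp
    · exact ih.map (fun a b h => by omega)
    · intro x hx hy
      have h0 : x = 0 := by split at hx <;> simp_all
      rcases List.mem_map.1 hy with ⟨z, hz, hz1⟩
      have := pvOcc_nonneg k t z hz
      omega

theorem pvOcc_mem_iff (k : String) (bs : List String) (i : Nat) :
    (i : Int) ∈ pvOcc k bs ↔ ∃ h : i < bs.length, bs[i] = k := by
  induction bs generalizing i with
  | nil => simp [pvOcc]
  | cons b t ih =>
    simp only [pvOcc, List.mem_append, List.mem_map]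
    cases i with
    | zero =>
      constructor
      · rintro (h | ⟨y, hy, hy0⟩)
        · split at h <;> simp_all
        · have := pvOcc_nonneg k t y hy; omega
      · intro ⟨h, hk⟩
        left; simp_all
    | succ i =>
      constructor
      · rintro (h | ⟨y, hy, hy1⟩)
        · exfalso; split at h <;> simp_all <;> omega
        · have : y = (i : Int) := by omega
          subst this
          rcases (ih i).1 hy with ⟨h, hk⟩
          exact ⟨by simpa using h, by simpa using hk⟩
      · intro ⟨h, hk⟩
        right
        exact ⟨(i : Int), (ih i).2 ⟨by simpa using h, by simpa using hk⟩, by omega⟩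

theorem pvOcc_getElem (k : String) (bs : List String) :
    ∀ (j : Nat), j < (pvOcc k bs).length →
      ∃ i : Nat, (pvOcc k bs)[j]? = some (i : Int) ∧ ∃ hi : i < bs.length, bs[i] = k ∧ (bs.take i).count k = j := by
  induction bs with
  | nil => intro j h; simp [pvOcc] at h
  | cons b t ih =>
    intro j h
    by_cases hb : b = k
    · subst hb
      rw [show pvOcc b (b :: t) = (0 : Int) :: (pvOcc b t).map (· + 1) from by simp [pvOcc]] at h ⊢
      cases j with
      | zero => exact ⟨0, by simp, by simp, rfl, by simp⟩
      | succ j =>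
        have hj : j < (pvOcc b t).length := by
          simp only [List.length_cons, List.length_map] at h; omega
        rcases ih j hj with ⟨i, hval, hi, hk, hcnt⟩
        refine ⟨i + 1, ?_, by simpa using hi, by simpa using hk, ?_⟩
        · rw [List.getElem?_cons_succ, List.getElem?_map, hval]
          simp
        · simp [List.count_cons, hcnt]
    · rw [show pvOcc k (b :: t) = (pvOcc k t).map (· + 1) from by simp [pvOcc, hb]] at h ⊢
      rcases ih j (by simpa using h) with ⟨i, hval, hi, hk, hcnt⟩
      refine ⟨i + 1, ?_, by simpa using hi, by simpa using hk, ?_⟩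
      · rw [List.getElem?_map, hval]
        simp
      · subst hk
        simp [List.count_cons, hcnt]
        omega

theorem pvEnumMapSnd {α : Type} (bs : List α) (s : Int) :
    (PySem.List.enumerate bs s).map (·.2) = bs := by
  induction bs generalizing s with
  | nil => simp [PySem.List.enumerate_nil]
  | cons b t ih => simp [PySem.List.enumerate_cons, ih]

theorem G_keys (bs : List String) :
    ((PySem.List.enumerate bs 0).foldl
      (fun d p => d.modify p.2 [] (fun l => l ++ [p.1])) PySem.Dict.empty).keys
    = PySem.Set.ofList bs := by
  rw [PySem.Dict.keys_foldl_modify_key (PySem.List.enumerate bs 0) (fun p => p.2) []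
      (fun _ p => fun l => l ++ [p.1]) PySem.Dict.empty]
  rw [PySem.Dict.keys_empty, pvEnumMapSnd, PySem.Set.update_nil_left]

theorem G_keys_nodup (bs : List String) :
    ((PySem.List.enumerate bs 0).foldl
      (fun d p => d.modify p.2 [] (fun l => l ++ [p.1])) PySem.Dict.empty).keys.Nodup := by
  rw [G_keys]; exact PySem.Set.nodup_ofList bs

theorem pvOcc_filter_eq (k : String) (bs : List String) : ∀ (s : Int),
    ((PySem.List.enumerate bs s).filter (fun q => q.2 == k)).map (·.1)
    = (pvOcc k bs).map (· + s) := by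
  induction bs with
  | nil => intro s; simp [PySem.List.enumerate_nil, pvOcc]
  | cons b t ih =>
    intro s
    simp only [PySem.List.enumerate_cons, List.filter_cons]
    by_cases hb : b = k
    · subst hb
      simp only [beq_self_eq_true, if_pos, List.map_cons]
      rw [show pvOcc b (b :: t) = (0 : Int) :: (pvOcc b t).map (· + 1) from by simp [pvOcc]]
      rw [ih (s + 1)]
      simp only [List.map_cons, List.map_map, zero_add]
      congr 1
      apply List.map_congr_left; intro x hx; simp; ring
    · have : (b == k) = false := by simp [hb]
      simp only [this, Bool.false_eq_true, if_false]
      rw [show pvOcc k (b :: t) = (pvOcc k t).map (· + 1) from by simp [pvOcc, hb]]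
      rw [ih (s + 1)]
      simp only [List.map_map]
      apply List.map_congr_left; intro x hx; simp; ring

theorem G_getD (bs : List String) (k : String) :
    ((PySem.List.enumerate bs 0).foldl
      (fun d p => d.modify p.2 [] (fun l => l ++ [p.1])) PySem.Dict.empty).getD k []
    = pvOcc k bs := by
  have hswap :
      ((PySem.List.enumerate bs 0).foldl
        (fun d p => d.modify p.2 [] (fun l => l ++ [p.1])) PySem.Dict.empty)
      = (((PySem.List.enumerate bs 0).map Prod.swap).foldl
        (fun d p => d.modify p.1 [] (fun l => l ++ [p.2])) PySem.Dict.empty) := by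
    rw [List.foldl_map]
    rfl
  rw [hswap, PySem.Dict.getD_foldl_modify_append]
  rw [List.filter_map, List.map_map]
  have h2 : ((PySem.List.enumerate bs 0).filter (fun q => q.2 == k)).map (·.1) = pvOcc k bs := by
    rw [pvOcc_filter_eq]; simp
  have h3 : (fun q : Int × String => (Prod.swap q).1 == k) = (fun q => q.2 == k) := rfl
  have h4 : ((fun x : String × Int => x.2) ∘ Prod.swap) = (fun q : Int × String => q.1) := rfl
  rw [h3, h4] at *
  simp only [PySem.Dict.getD_empty, List.nil_append]
  exact h2

theorem G_items (bs : List String) :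
    ((PySem.List.enumerate bs 0).foldl
      (fun d p => d.modify p.2 [] (fun l => l ++ [p.1])) PySem.Dict.empty).items
    = (PySem.Set.ofList bs).map (fun k => (k, pvOcc k bs)) := by
  rw [PySem.Dict.items_eq_map_keys _ (G_keys_nodup bs) []]
  rw [G_keys]
  apply List.map_congr_left
  intro k _
  rw [G_getD]

theorem W_len (k : String) (qs : List (Int × Int)) (r : List String) :
    (qs.foldl (fun r q => r.set q.2.toNat (pvFmt k q.1)) r).length = r.length := by
  induction qs generalizing r with
  | nil => rfl
  | cons q t ih => simp [ih, List.length_set]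

theorem W_untouched (k : String) (qs : List (Int × Int)) (r : List String) (i : Nat)
    (h : i ∉ qs.map (fun q => q.2.toNat)) :
    (qs.foldl (fun r q => r.set q.2.toNat (pvFmt k q.1)) r)[i]? = r[i]? := by
  induction qs generalizing r with
  | nil => rfl
  | cons q t ih =>
    simp only [List.map_cons, List.mem_cons, not_or] at h
    rw [List.foldl_cons, ih _ h.2, List.getElem?_set_ne (Ne.symm h.1)]

theorem pvEnumMapSndToNat (l : List Int) (s : Int) :
    (PySem.List.enumerate l s).map (fun q => q.2.toNat) = l.map Int.toNat := by
  have : (fun q : Int × Int => q.2.toNat) = (Int.toNat ∘ fun q : Int × Int => q.2) := rfl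
  rw [this, ← List.map_map, pvEnumMapSnd]

theorem W_hit (k : String) (rest : List Int) : ∀ (s : Int) (r : List String) (j : Nat) (x : Int),
    rest[j]? = some x → rest.Nodup → (∀ y ∈ rest, 0 ≤ y ∧ y < (r.length : Int)) →
    ((PySem.List.enumerate rest s).foldl (fun r q => r.set q.2.toNat (pvFmt k q.1)) r)[x.toNat]?
      = some (pvFmt k (s + j)) := by
  induction rest with
  | nil => intro s r j x hg; simp at hg
  | cons x0 t ih =>
    intro s r j x hg hnd hb
    rw [PySem.List.enumerate_cons, List.foldl_cons]
    cases j with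
    | zero =>
      rw [List.getElem?_cons_zero, Option.some_inj] at hg
      subst hg
      have hx0 := hb x0 (List.mem_cons_self)
      have hnotin : x0.toNat ∉ (PySem.List.enumerate t (s + 1)).map (fun q => q.2.toNat) := by
        rw [pvEnumMapSndToNat]
        intro hmem
        rcases List.mem_map.1 hmem with ⟨y, hy, hyx⟩
        have hy' := hb y (List.mem_cons_of_mem _ hy)
        have : y = x0 := by omega
        subst this
        exact (List.nodup_cons.1 hnd).1 hy
      rw [W_untouched k _ _ _ hnotin]
      rw [List.getElem?_set_self (by omega)]
      norm_num
    | succ j =>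
      rw [List.getElem?_cons_succ] at hg
      have := ih (s + 1) (r.set x0.toNat (pvFmt k s)) j x hg (List.nodup_cons.1 hnd).2
        (by intro y hy; have := hb y (List.mem_cons_of_mem _ hy); simpa [List.length_set] using this)
      rw [this]
      congr 2
      push_cast; ring

theorem scatter_length (res : List String) (p : String × List Int) :
    (pvScatter res p).length = res.length := by
  rcases p with ⟨k, idxs⟩
  cases idxs with
  | nil => rfl
  | cons i0 rest => simp [pvScatter, W_len, List.length_set]

theorem scatter_hit (bs : List String) (k : String) (res : List String)
    (hres : res.length = bs.length) (i : Nat) (hi : i < bs.length)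
    (hbi : bs[i] = k) :
    (pvScatter res (k, pvOcc k bs))[i]? = some (pvName k ((bs.take i).count k)) := by
  have hmem : (i : Int) ∈ pvOcc k bs := (pvOcc_mem_iff k bs i).2 ⟨hi, hbi⟩
  rcases List.mem_iff_getElem?.1 hmem with ⟨j, hjv⟩
  have hjlt : j < (pvOcc k bs).length := by
    rcases List.getElem?_eq_some_iff.1 hjv with ⟨h, _⟩; exact h
  rcases pvOcc_getElem k bs j hjlt with ⟨i', hv', hi', hk', hcnt'⟩
  rw [hjv] at hv'
  have hii : i' = i := by
    have := Option.some_inj.1 hv'; omega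
  subst hii
  have hnd := pvOcc_nodup k bs
  have hnn := pvOcc_nonneg k bs
  have hlt := pvOcc_lt k bs
  rcases hocc : pvOcc k bs with _ | ⟨i0, rest⟩
  · rw [hocc] at hjv; simp at hjv
  · rw [hocc] at hjv hnd
    simp only [pvScatter]
    cases j with
    | zero =>
      rw [List.getElem?_cons_zero, Option.some_inj] at hjv
      subst hjv
      have hnotin : i' ∉ (PySem.List.enumerate rest 1).map (fun q => q.2.toNat) := by
        rw [pvEnumMapSndToNat]
        intro hmem2
        rcases List.mem_map.1 hmem2 with ⟨y, hy, hyx⟩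
        have hynn : 0 ≤ y := hnn y (by rw [hocc]; exact List.mem_cons_of_mem _ hy)
        have : y = (i' : Int) := by omega
        subst this
        exact (List.nodup_cons.1 hnd).1 hy
      rw [W_untouched _ _ _ _ hnotin, Int.toNat_natCast]
      rw [List.getElem?_set_self (by omega)]
      rw [hcnt']
      simp [pvName]
    | succ j =>
      rw [List.getElem?_cons_succ] at hjv
      have hbnd : ∀ y ∈ rest, 0 ≤ y ∧ y < ((res.set i0.toNat k).length : Int) := by
        intro y hy
        have h1 := hnn y (by rw [hocc]; exact List.mem_cons_of_mem _ hy)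
        have h2 := hlt y (by rw [hocc]; exact List.mem_cons_of_mem _ hy)
        simp [List.length_set]; omega
      have := W_hit k rest 1 (res.set i0.toNat k) j (i' : Int) hjv (List.nodup_cons.1 hnd).2 hbnd
      rw [Int.toNat_natCast] at this
      rw [this, hcnt']
      simp [pvName]
      congr 1
      push_cast; ring

theorem scatter_miss (bs : List String) (k : String) (res : List String)
    (i : Nat) (hi : i < bs.length) (hbi : bs[i] ≠ k) :
    (pvScatter res (k, pvOcc k bs))[i]? = res[i]? := by
  have hmem : (i : Int) ∉ pvOcc k bs := by
    intro h
    rcases (pvOcc_mem_iff k bs i).1 h with ⟨h1, h2⟩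
    exact hbi h2
  have hnn := pvOcc_nonneg k bs
  rcases hocc : pvOcc k bs with _ | ⟨i0, rest⟩
  · simp [pvScatter]
  · simp only [pvScatter]
    have hnotin : i ∉ (PySem.List.enumerate rest 1).map (fun q => q.2.toNat) := by
      rw [pvEnumMapSndToNat]
      intro hmem2
      rcases List.mem_map.1 hmem2 with ⟨y, hy, hyx⟩
      have hynn : 0 ≤ y := hnn y (by rw [hocc]; exact List.mem_cons_of_mem _ hy)
      have : y = (i : Int) := by omega
      subst this
      exact hmem (by rw [hocc]; exact List.mem_cons_of_mem _ hy)
    rw [W_untouched _ _ _ _ hnotin]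
    have hne : i0.toNat ≠ i := by
      intro h
      have h0 : 0 ≤ i0 := hnn i0 (by rw [hocc]; exact List.mem_cons_self)
      have : i0 = (i : Int) := by omega
      subst this
      exact hmem (by rw [hocc]; exact List.mem_cons_self)
    rw [List.getElem?_set_ne hne]

theorem outer_fold (bs : List String) (K : List String) :
    ∀ res : List String, res.length = bs.length → K.Nodup → (∀ k ∈ K, k ∈ bs) →
      ((K.map (fun k => (k, pvOcc k bs))).foldl pvScatter res).length = bs.length ∧
      ∀ i : Nat, ∀ hi : i < bs.length,
        ((K.map (fun k => (k, pvOcc k bs))).foldl pvScatter res)[i]?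
          = if bs[i] ∈ K then some (pvName bs[i] ((bs.take i).count bs[i])) else res[i]? := by
  induction K with
  | nil => intro res hres _ _; simp [hres]
  | cons k K' ih =>
    intro res hres hnd hsub
    rw [List.map_cons, List.foldl_cons]
    have hres' : (pvScatter res (k, pvOcc k bs)).length = bs.length := by
      rw [scatter_length]; exact hres
    rcases ih (pvScatter res (k, pvOcc k bs)) hres' (List.nodup_cons.1 hnd).2
      (fun k' hk' => hsub k' (List.mem_cons_of_mem _ hk')) with ⟨hlen, hget⟩
    refine ⟨hlen, ?_⟩
    intro i hi
    rw [hget i hi]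
    by_cases hbk : bs[i] = k
    · have hnotK' : bs[i] ∉ K' := by rw [hbk]; exact (List.nodup_cons.1 hnd).1
      rw [if_neg hnotK', if_pos (by rw [hbk]; exact List.mem_cons_self)]
      rw [← hbk] at *
      exact scatter_hit bs bs[i] res hres i hi rfl
    · have h1 : (bs[i] ∈ k :: K') ↔ (bs[i] ∈ K') := by
        simp [List.mem_cons, hbk]
      by_cases h2 : bs[i] ∈ K'
      · rw [if_pos h2, if_pos (h1.2 h2)]
      · rw [if_neg h2, if_neg (fun h => h2 (h1.1 h))]
        exact scatter_miss bs k res i hi hbk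

theorem B_eq (labels : List String) (m : Int) :
    shorten_labels_alt labels m
      = pvA [] (labels.map (fun l => PySem.Str.slice l none (some m))) := by
  show (((PySem.List.enumerate (labels.map (fun l => PySem.Str.slice l none (some m)))).foldl
      (fun d p => d.modify p.2 [] (fun l => l ++ [p.1])) PySem.Dict.empty).items.foldl
      pvScatter
      (List.replicate (labels.map (fun l => PySem.Str.slice l none (some m))).length ""))
    = _
  set bs := labels.map (fun l => PySem.Str.slice l none (some m)) with hbs
  rw [G_items bs]
  obtain ⟨hlen, hget⟩ := outer_fold bs (PySem.Set.ofList bs) (List.replicate bs.length "")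
    (by simp) (PySem.Set.nodup_ofList bs) (fun k hk => (PySem.Set.mem_ofList bs k).1 hk)
  apply List.ext_getElem?
  intro i
  by_cases hi : i < bs.length
  · rw [hget i hi,
      if_pos ((PySem.Set.mem_ofList bs _).2 (List.getElem_mem hi)),
      List.getElem?_eq_getElem (by rw [pvA_length]; exact hi),
      pvA_getElem bs [] i hi]
    simp
  · have h1 : (((PySem.Set.ofList bs).map (fun k => (k, pvOcc k bs))).foldl pvScatter
        (List.replicate bs.length ""))[i]? = none :=
      List.getElem?_eq_none (by rw [hlen]; omega)
    have h2 : (pvA [] bs)[i]? = none := List.getElem?_eq_none (by rw [pvA_length]; omega)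
    rw [h1, h2]

-- ===== VERDICT (by name: the statement is the Claim_ definition above) =====
theorem shorten_labels_spec : Claim_equal_shorten_labels := by
  intro labels m _
  unfold Spec_shorten_labels
  rw [A_eq_pvA, B_eq]
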